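-- pv_equiv track=rewrite | github.com/cielavenir/checkio | berserk-rook.py | solve
-- ===== SOURCE A (Python) =====
-- def solve(head,enemy):
-- 	r=0
-- 	for i in range(len(enemy)):
-- 		if enemy[i][0]==head[0] and not any(enemy[j][0]==head[0] and (head[1]<enemy[j][1]<enemy[i][1] or enemy[i][1]<enemy[j][1]<head[1]) for j in range(len(enemy))):
-- 			r=max(r,solve(enemy[i],enemy[:i]+enemy[i+1:])+1)
-- 		if enemy[i][1]==head[1] and not any(enemy[j][1]==head[1] and (head[0]<enemy[j][0]<enemy[i][0] or enemy[i][0]<enemy[j][0]<head[0]) for j in range(len(enemy))):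
-- 			r=max(r,solve(enemy[i],enemy[:i]+enemy[i+1:])+1)
-- 	return r
-- ===== SOURCE B (Python) =====
-- def solve(head, enemy):
--     # One pass computes, for each of the four rook directions, the minimal
--     # distance to an enemy on head's row/column; a second pass recurses only
--     # on enemies at that minimal distance (they are exactly the unobstructed
--     # ones) and on enemies sharing head's square (never obstructed).
--     up = down = left = right = None
--     for e in enemy:
--         if e[0] == head[0]:
--             d = ord(e[1]) - ord(head[1])
--             if d > 0:
--                 up = d if up is None else min(up, d)
--             elif d < 0:
--                 down = -d if down is None else min(down, -d)
--         elif e[1] == head[1]: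
--             d = ord(e[0]) - ord(head[0])
--             if d > 0:
--                 right = d if right is None else min(right, d)
--             else:
--                 left = -d if left is None else min(left, -d)
--     r = 0
--     for i, e in enumerate(enemy):
--         if e[0] == head[0] and e[1] == head[1]:
--             take = True
--         elif e[0] == head[0]:
--             d = ord(e[1]) - ord(head[1])
--             take = (d > 0 and d == up) or (d < 0 and -d == down)
--         elif e[1] == head[1]:
--             d = ord(e[0]) - ord(head[0])
--             take = (d > 0 and d == right) or (d < 0 and -d == left)
--         else:
--             take = False
--         if take:
--             r = max(r, solve(e, enemy[:i] + enemy[i + 1:]) + 1)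
--     return r
-- ===== Notes on version B (the rewrite author's own statement) =====
-- stated objective: alternative
-- what changed: Instead of A's per-enemy 'any' obstruction scan at every search node, B precomputes in one pass the minimal distance in each of the four rook directions and recurses exactly on the enemies realising those minima (plus enemies on head's own square, which are never obstructed).
import Mathlib
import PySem

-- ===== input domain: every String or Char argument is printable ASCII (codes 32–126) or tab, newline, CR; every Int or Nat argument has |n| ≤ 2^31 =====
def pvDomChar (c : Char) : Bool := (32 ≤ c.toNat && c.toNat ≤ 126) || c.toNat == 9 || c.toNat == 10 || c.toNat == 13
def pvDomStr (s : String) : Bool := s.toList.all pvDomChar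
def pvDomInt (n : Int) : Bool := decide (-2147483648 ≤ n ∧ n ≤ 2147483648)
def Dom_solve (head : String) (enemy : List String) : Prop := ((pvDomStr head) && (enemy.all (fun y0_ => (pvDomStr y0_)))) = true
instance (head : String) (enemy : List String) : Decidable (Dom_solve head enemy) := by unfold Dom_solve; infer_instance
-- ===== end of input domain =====

-- B replaces A's per-candidate obstruction scan by four precomputed minimal
-- directional distances (one pass), recursing on the same capture set (objective: alternative).

-- ===== PORT A =====
-- s[i] as a code point; Python raises IndexError when i is out of range (Pre_solve
-- excludes those inputs, so the default is never observed inside the claim);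
-- Python's ==/< on single characters is exactly code-point equality/order.
def pvCh (s : String) (i : Nat) : Nat := (s.toList.getD i default).toNat

-- the generator 'any(enemy[j][0]==head[0] and (head[1]<enemy[j][1]<enemy[i][1] or
-- enemy[i][1]<enemy[j][1]<head[1]) for j in range(len(enemy)))'
def pvBlockRow (head ei : String) (enemy : List String) : Bool :=
  (List.range enemy.length).any fun j =>
    let ej := enemy.getD j ""
    pvCh ej 0 == pvCh head 0 &&
      ((decide (pvCh head 1 < pvCh ej 1) && decide (pvCh ej 1 < pvCh ei 1)) ||
       (decide (pvCh ei 1 < pvCh ej 1) && decide (pvCh ej 1 < pvCh head 1)))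

-- the second generator, with coordinates 0/1 swapped
def pvBlockCol (head ei : String) (enemy : List String) : Bool :=
  (List.range enemy.length).any fun j =>
    let ej := enemy.getD j ""
    pvCh ej 1 == pvCh head 1 &&
      ((decide (pvCh head 0 < pvCh ej 0) && decide (pvCh ej 0 < pvCh ei 0)) ||
       (decide (pvCh ei 0 < pvCh ej 0) && decide (pvCh ej 0 < pvCh head 0)))

-- the recursion: Python recurses on a list one element shorter each time, so
-- enemy.length steps of fuel make the structural recursion exact (the fuel-0
-- branch is never reached from solve, which always passes fuel = length)
def solveF : Nat → String → List String → Int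
  | 0, _, _ => 0
  | fuel + 1, head, enemy =>
    -- for i in range(len(enemy)): two guarded 'r = max(r, solve(enemy[i], enemy[:i]+enemy[i+1:])+1)'
    (List.range enemy.length).foldl (fun r i =>
      let e := enemy.getD i ""
      let rest := enemy.take i ++ enemy.drop (i + 1)   -- enemy[:i] + enemy[i+1:] (exact: 0 ≤ i < len)
      let r1 := if pvCh e 0 == pvCh head 0 && !pvBlockRow head e enemy then
                  max r (solveF fuel e rest + 1) else r
      let r2 := if pvCh e 1 == pvCh head 1 && !pvBlockCol head e enemy then
                  max r1 (solveF fuel e rest + 1) else r1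
      r2) 0

def solve (head : String) (enemy : List String) : Int :=
  solveF enemy.length head enemy

-- ===== PORT B =====
-- 'up = d if up is None else min(up, d)'
def pvMinD (o : Option Int) (v : Int) : Option Int :=
  match o with
  | none => some v
  | some x => some (min x v)

-- one enemy's contribution to the four minima (the body of B's first loop)
def pvDirStep (head : String)
    (st : Option Int × Option Int × Option Int × Option Int) (e : String) :
    Option Int × Option Int × Option Int × Option Int :=
  match st with
  | (u, d, l, r) =>
    if pvCh e 0 == pvCh head 0 then
      let dd : Int := (pvCh e 1 : Int) - (pvCh head 1 : Int)
      if 0 < dd then (pvMinD u dd, d, l, r)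
      else if dd < 0 then (u, pvMinD d (-dd), l, r)
      else (u, d, l, r)
    else if pvCh e 1 == pvCh head 1 then
      let dd : Int := (pvCh e 0 : Int) - (pvCh head 0 : Int)
      if 0 < dd then (u, d, l, pvMinD r dd)
      else (u, d, pvMinD l (-dd), r)
    else (u, d, l, r)

-- B's first pass: minimal distance to an enemy in each of the four directions
def pvDirs (head : String) (enemy : List String) :
    Option Int × Option Int × Option Int × Option Int :=
  enemy.foldl (pvDirStep head) (none, none, none, none)

-- B's per-enemy capture test against the precomputed minima
def pvTake (head e : String)
    (dirs : Option Int × Option Int × Option Int × Option Int) : Bool :=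
  match dirs with
  | (u, d, l, r) =>
    if pvCh e 0 == pvCh head 0 && pvCh e 1 == pvCh head 1 then true
    else if pvCh e 0 == pvCh head 0 then
      let dd : Int := (pvCh e 1 : Int) - (pvCh head 1 : Int)
      (decide (0 < dd) && u == some dd) || (decide (dd < 0) && d == some (-dd))
    else if pvCh e 1 == pvCh head 1 then
      let dd : Int := (pvCh e 0 : Int) - (pvCh head 0 : Int)
      (decide (0 < dd) && r == some dd) || (decide (dd < 0) && l == some (-dd))
    else false

def solveAltF : Nat → String → List String → Int
  | 0, _, _ => 0
  | fuel + 1, head, enemy =>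
    let dirs := pvDirs head enemy
    -- B's second pass: 'for i, e in enumerate(enemy): if take: r = max(r, solve(e, …)+1)'
    (List.range enemy.length).foldl (fun r i =>
      let e := enemy.getD i ""
      if pvTake head e dirs then
        max r (solveAltF fuel e (enemy.take i ++ enemy.drop (i + 1)) + 1) else r) 0

def solve_alt (head : String) (enemy : List String) : Int :=
  solveAltF enemy.length head enemy

-- ===== PRECONDITION & SPEC =====
-- Pre_solve: exactly the inputs where Python A returns — with a nonempty enemy list,
-- head[1] and every enemy[i][1] are read, so all those strings need length ≥ 2
-- (otherwise IndexError); with enemy == [] A returns 0 for any head.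
def Pre_solve (head : String) (enemy : List String) : Prop :=
  enemy ≠ [] → (2 ≤ head.toList.length ∧ ∀ e ∈ enemy, 2 ≤ e.toList.length)
instance (head : String) (enemy : List String) : Decidable (Pre_solve head enemy) := by
  unfold Pre_solve; infer_instance

def pvWitness_solve : String × List String := ("b2", ["b5", "b7", "d2", "c3"])

def Spec_solve (head : String) (enemy : List String) (out : Int) : Prop := out = solve_alt head enemy
instance (head : String) (enemy : List String) (out : Int) : Decidable (Spec_solve head enemy out) := by unfold Spec_solve; infer_instance

-- ===== CLAIM (what is proved, stated in full; the proofs are below) =====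
def Claim_equal_solve : Prop := ∀ (head : String) (enemy : List String), Dom_solve head enemy → Pre_solve head enemy → Spec_solve head enemy (solve head enemy)

-- ===== LEMMAS AND PROOFS =====

-- the list of (positive) distances, along direction δ, of the enemies that satisfy P
def dirList (P : String → Bool) (δ : String → Int) (enemy : List String) : List Int :=
  enemy.filterMap fun x => if P x && decide (0 < δ x) then some (δ x) else none

theorem foldl_pvMinD_some (xs : List Int) (a : Int) :
    xs.foldl pvMinD (some a) = some (xs.foldl min a) := by
  induction xs generalizing a with
  | nil => rfl
  | cons x t ih => simp [pvMinD, ih]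

theorem foldMin_eq_some_iff (xs : List Int) (m : Int) (hm : m ∈ xs) :
    xs.foldl pvMinD none = some m ↔ ∀ x ∈ xs, m ≤ x := by
  match xs with
  | [] => cases hm
  | x :: t =>
    have hle := PySem.List.foldl_min_le t x
    have hmem := PySem.List.foldl_min_mem t x
    simp only [List.foldl_cons, pvMinD, foldl_pvMinD_some, Option.some.injEq]
    constructor
    · rintro rfl
      intro y hy
      rcases List.mem_cons.mp hy with rfl | hy
      · exact hle.1
      · exact hle.2 y hy
    · intro hall
      have h1 : t.foldl min x ≤ m := by
        rcases List.mem_cons.mp hm with rfl | h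
        · exact hle.1
        · exact hle.2 m h
      have h2 : m ≤ t.foldl min x := by
        rcases hmem with h | h
        · rw [h]; exact hall x (List.mem_cons_self ..)
        · exact hall _ (List.mem_cons_of_mem _ h)
      omega

theorem mem_dirList (P : String → Bool) (δ : String → Int) (enemy : List String)
    (e : String) (he : e ∈ enemy) (hP : P e = true) (hpos : 0 < δ e) :
    δ e ∈ dirList P δ enemy := by
  exact List.mem_filterMap.mpr ⟨e, he, by simp [hP, hpos]⟩

-- the crux: δ e is the minimal positive δ-distance iff no enemy lies strictly between
theorem min_iff_unblocked (P : String → Bool) (δ : String → Int) (enemy : List String)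
    (e : String) (he : e ∈ enemy) (hP : P e = true) (hpos : 0 < δ e) :
    (dirList P δ enemy).foldl pvMinD none = some (δ e) ↔
      ¬ ∃ x ∈ enemy, P x = true ∧ ((0 < δ x ∧ δ x < δ e) ∨ (δ e < δ x ∧ δ x < 0)) := by
  rw [foldMin_eq_some_iff _ _ (mem_dirList P δ enemy e he hP hpos)]
  constructor
  · rintro hall ⟨x, hx, hPx, hcase⟩
    rcases hcase with ⟨h1, h2⟩ | ⟨h1, h2⟩
    · have := hall (δ x) (mem_dirList P δ enemy x hx hPx h1)
      omega
    · omega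
  · intro hno v hv
    rw [dirList] at hv
    obtain ⟨x, hx, hfx⟩ := List.mem_filterMap.mp hv
    cases hcond : (P x && decide (0 < δ x)) with
    | false => simp [hcond] at hfx
    | true =>
      simp only [hcond, if_true] at hfx
      obtain rfl := (Option.some.injEq ..).mp hfx
      simp only [Bool.and_eq_true, decide_eq_true_eq] at hcond
      by_contra hlt
      exact hno ⟨x, hx, hcond.1, Or.inl ⟨hcond.2, by omega⟩⟩

theorem dirList_cons_pos {P : String → Bool} {δ : String → Int} {x : String} {t : List String}
    (h : (P x && decide (0 < δ x)) = true) : dirList P δ (x :: t) = δ x :: dirList P δ t := by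
  have h' : P x = true ∧ 0 < δ x := by simpa using h
  simp [dirList, h']

theorem dirList_cons_neg {P : String → Bool} {δ : String → Int} {x : String} {t : List String}
    (h : (P x && decide (0 < δ x)) = false) : dirList P δ (x :: t) = dirList P δ t := by
  have h' : ¬ (P x = true ∧ 0 < δ x) := by simpa using h
  simp [dirList, h']

theorem pvDirs_go (head : String) (enemy : List String) : ∀ (u d l r : Option Int),
    enemy.foldl (pvDirStep head) (u, d, l, r)
    = ((dirList (fun x => pvCh x 0 == pvCh head 0) (fun x => (pvCh x 1 : Int) - pvCh head 1) enemy).foldl pvMinD u,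
       (dirList (fun x => pvCh x 0 == pvCh head 0) (fun x => (pvCh head 1 : Int) - pvCh x 1) enemy).foldl pvMinD d,
       (dirList (fun x => pvCh x 1 == pvCh head 1) (fun x => (pvCh head 0 : Int) - pvCh x 0) enemy).foldl pvMinD l,
       (dirList (fun x => pvCh x 1 == pvCh head 1) (fun x => (pvCh x 0 : Int) - pvCh head 0) enemy).foldl pvMinD r) := by
  induction enemy with
  | nil => intro u d l r; rfl
  | cons x t ih =>
    intro u d l r
    rw [List.foldl_cons]
    by_cases h0 : pvCh x 0 = pvCh head 0
    · have hz : ((pvCh head 0 : Int) - pvCh x 0) = 0 := by omega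
      have hz' : ((pvCh x 0 : Int) - pvCh head 0) = 0 := by omega
      by_cases hup : (0:Int) < (pvCh x 1 : Int) - pvCh head 1
      · rw [show pvDirStep head (u, d, l, r) x = (pvMinD u ((pvCh x 1 : Int) - pvCh head 1), d, l, r) from by
            simp only [pvDirStep, beq_iff_eq]; split_ifs ; rfl]
        rw [ih, dirList_cons_pos (by simp [h0] ; omega),
            dirList_cons_neg (by simp ; omega),
            dirList_cons_neg (by simp [hz]),
            dirList_cons_neg (by simp [hz']), List.foldl_cons]
      · by_cases hdn : ((pvCh x 1 : Int) - pvCh head 1) < 0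
        · rw [show pvDirStep head (u, d, l, r) x = (u, pvMinD d (-((pvCh x 1 : Int) - pvCh head 1)), l, r) from by
              simp only [pvDirStep, beq_iff_eq]; split_ifs ; rfl,
            show -((pvCh x 1 : Int) - pvCh head 1) = (pvCh head 1 : Int) - pvCh x 1 from by omega]
          rw [ih, dirList_cons_neg (by simp ; omega),
              dirList_cons_pos (by simp [h0] ; omega),
              dirList_cons_neg (by simp [hz]),
              dirList_cons_neg (by simp [hz']), List.foldl_cons]
        · rw [show pvDirStep head (u, d, l, r) x = (u, d, l, r) from by
              simp only [pvDirStep, beq_iff_eq]; split_ifs ; rfl]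
          rw [ih, dirList_cons_neg (by simp ; omega),
              dirList_cons_neg (by simp ; omega),
              dirList_cons_neg (by simp [hz]),
              dirList_cons_neg (by simp [hz'])]
    · by_cases h1 : pvCh x 1 = pvCh head 1
      · by_cases hrt : (0:Int) < (pvCh x 0 : Int) - pvCh head 0
        · rw [show pvDirStep head (u, d, l, r) x = (u, d, l, pvMinD r ((pvCh x 0 : Int) - pvCh head 0)) from by
              simp only [pvDirStep, beq_iff_eq]; split_ifs ; rfl]
          rw [ih, dirList_cons_neg (by simp [h0]),
              dirList_cons_neg (by simp [h0]),
              dirList_cons_neg (by simp ; omega),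
              dirList_cons_pos (by simp [h1] ; omega), List.foldl_cons]
        · have hlt : ((pvCh x 0 : Int) - pvCh head 0) < 0 := by
            rcases Nat.lt_trichotomy (pvCh x 0) (pvCh head 0) with h | h | h <;> omega
          rw [show pvDirStep head (u, d, l, r) x = (u, d, pvMinD l (-((pvCh x 0 : Int) - pvCh head 0)), r) from by
              simp only [pvDirStep, beq_iff_eq]; split_ifs ; rfl,
            show -((pvCh x 0 : Int) - pvCh head 0) = (pvCh head 0 : Int) - pvCh x 0 from by omega]
          rw [ih, dirList_cons_neg (by simp [h0]),
              dirList_cons_neg (by simp [h0]),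
              dirList_cons_pos (by simp [h1] ; omega),
              dirList_cons_neg (by simp ; omega), List.foldl_cons]
      · rw [show pvDirStep head (u, d, l, r) x = (u, d, l, r) from by
            simp only [pvDirStep, beq_iff_eq]; split_ifs ; rfl]
        rw [ih, dirList_cons_neg (by simp [h0]),
            dirList_cons_neg (by simp [h0]),
            dirList_cons_neg (by simp [h1]),
            dirList_cons_neg (by simp [h1])]

theorem blockRow_iff (head ei : String) (enemy : List String) :
    pvBlockRow head ei enemy = true ↔
      ∃ x ∈ enemy, pvCh x 0 = pvCh head 0 ∧
        ((pvCh head 1 < pvCh x 1 ∧ pvCh x 1 < pvCh ei 1) ∨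
         (pvCh ei 1 < pvCh x 1 ∧ pvCh x 1 < pvCh head 1)) := by
  simp only [pvBlockRow, List.any_eq_true, List.mem_range, beq_iff_eq, Bool.and_eq_true,
    Bool.or_eq_true, decide_eq_true_eq]
  constructor
  · rintro ⟨j, hj, hcond⟩
    refine ⟨enemy.getD j "", ?_, hcond⟩
    rw [List.getD_eq_getElem _ _ hj]
    exact List.getElem_mem hj
  · rintro ⟨x, hx, hcond⟩
    obtain ⟨j, hj, rfl⟩ := List.mem_iff_getElem.mp hx
    exact ⟨j, hj, by rw [List.getD_eq_getElem _ _ hj]; exact hcond⟩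

theorem blockCol_iff (head ei : String) (enemy : List String) :
    pvBlockCol head ei enemy = true ↔
      ∃ x ∈ enemy, pvCh x 1 = pvCh head 1 ∧
        ((pvCh head 0 < pvCh x 0 ∧ pvCh x 0 < pvCh ei 0) ∨
         (pvCh ei 0 < pvCh x 0 ∧ pvCh x 0 < pvCh head 0)) := by
  simp only [pvBlockCol, List.any_eq_true, List.mem_range, beq_iff_eq, Bool.and_eq_true,
    Bool.or_eq_true, decide_eq_true_eq]
  constructor
  · rintro ⟨j, hj, hcond⟩
    refine ⟨enemy.getD j "", ?_, hcond⟩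
    rw [List.getD_eq_getElem _ _ hj]
    exact List.getElem_mem hj
  · rintro ⟨x, hx, hcond⟩
    obtain ⟨j, hj, rfl⟩ := List.mem_iff_getElem.mp hx
    exact ⟨j, hj, by rw [List.getD_eq_getElem _ _ hj]; exact hcond⟩

theorem fire_iff (P : String → Bool) (δ : String → Int) (enemy : List String) (e : String)
    (he : e ∈ enemy) (hP : P e = true) (hpos : 0 < δ e) (B : Bool)
    (hB : B = true ↔ ∃ x ∈ enemy, P x = true ∧ ((0 < δ x ∧ δ x < δ e) ∨ (δ e < δ x ∧ δ x < 0))) :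
    ((dirList P δ enemy).foldl pvMinD none == some (δ e)) = !B := by
  rw [Bool.eq_iff_iff, beq_iff_eq, min_iff_unblocked P δ enemy e he hP hpos,
    Bool.not_eq_true', ← Bool.not_eq_true, hB]

theorem take_iff (head : String) (enemy : List String) (e : String) (he : e ∈ enemy) :
    pvTake head e (pvDirs head enemy) =
      ((pvCh e 0 == pvCh head 0 && !pvBlockRow head e enemy) ||
       (pvCh e 1 == pvCh head 1 && !pvBlockCol head e enemy)) := by
  rw [pvDirs, pvDirs_go]
  by_cases h0 : pvCh e 0 = pvCh head 0
  · by_cases h1 : pvCh e 1 = pvCh head 1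
    · have hbr : pvBlockRow head e enemy = false := by
        rw [← Bool.not_eq_true, blockRow_iff]
        rintro ⟨x, hx, hxc, hcase⟩; omega
      simp [pvTake, h0, h1, hbr]
    · by_cases hup : pvCh head 1 < pvCh e 1
      · have hB : pvBlockRow head e enemy = true ↔
            ∃ x ∈ enemy, ((fun x => pvCh x 0 == pvCh head 0) x = true ∧
              ((0 < (fun x => (pvCh x 1 : Int) - pvCh head 1) x ∧
                 (fun x => (pvCh x 1 : Int) - pvCh head 1) x < (fun x => (pvCh x 1 : Int) - pvCh head 1) e) ∨
               ((fun x => (pvCh x 1 : Int) - pvCh head 1) e < (fun x => (pvCh x 1 : Int) - pvCh head 1) x ∧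
                 (fun x => (pvCh x 1 : Int) - pvCh head 1) x < 0))) := by
          rw [blockRow_iff]
          refine exists_congr fun x => and_congr_right fun _ => ?_
          simp only [beq_iff_eq]; omega
        have hfire := fire_iff (fun x => pvCh x 0 == pvCh head 0)
          (fun x => (pvCh x 1 : Int) - pvCh head 1) enemy e he (by simp [h0]) (by simp; omega)
          (pvBlockRow head e enemy) hB
        have hd1 : (0:Int) < (pvCh e 1 : Int) - (pvCh head 1 : Int) := by omega
        have hd2 : ¬((pvCh e 1 : Int) - (pvCh head 1 : Int) < 0) := by omega
        simp only [pvTake, h0, h1, beq_self_eq_true, beq_iff_eq, if_true, if_false,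
           Bool.false_and, 
          if_neg (show ¬(pvCh e 0 = pvCh head 0 ∧ pvCh e 1 = pvCh head 1) from fun h => h1 h.2),
          if_pos h0, hd1, hd2, decide_true, decide_false, Bool.or_false, Bool.false_or] at hfire ⊢
        simp [hfire, h1]
      · have hdn : pvCh e 1 < pvCh head 1 := by omega
        have hB : pvBlockRow head e enemy = true ↔
            ∃ x ∈ enemy, ((fun x => pvCh x 0 == pvCh head 0) x = true ∧
              ((0 < (fun x => (pvCh head 1 : Int) - pvCh x 1) x ∧
                 (fun x => (pvCh head 1 : Int) - pvCh x 1) x < (fun x => (pvCh head 1 : Int) - pvCh x 1) e) ∨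
               ((fun x => (pvCh head 1 : Int) - pvCh x 1) e < (fun x => (pvCh head 1 : Int) - pvCh x 1) x ∧
                 (fun x => (pvCh head 1 : Int) - pvCh x 1) x < 0))) := by
          rw [blockRow_iff]
          refine exists_congr fun x => and_congr_right fun _ => ?_
          simp only [beq_iff_eq]; omega
        have hfire := fire_iff (fun x => pvCh x 0 == pvCh head 0)
          (fun x => (pvCh head 1 : Int) - pvCh x 1) enemy e he (by simp [h0]) (by simp; omega)
          (pvBlockRow head e enemy) hB
        have hd1 : ¬((0:Int) < (pvCh e 1 : Int) - (pvCh head 1 : Int)) := by omega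
        have hd2 : ((pvCh e 1 : Int) - (pvCh head 1 : Int)) < 0 := by omega
        have hneg : -((pvCh e 1 : Int) - (pvCh head 1 : Int)) = (pvCh head 1 : Int) - (pvCh e 1 : Int) := by omega
        simp only [pvTake, beq_iff_eq,
          if_neg (show ¬(pvCh e 0 = pvCh head 0 ∧ pvCh e 1 = pvCh head 1) from fun h => h1 h.2),
          if_pos h0, hd1, hd2, decide_true, decide_false, Bool.false_and, Bool.false_or, hneg] at hfire ⊢
        simp [hfire, h0, h1]
  · by_cases h1 : pvCh e 1 = pvCh head 1
    · by_cases hrt : pvCh head 0 < pvCh e 0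
      · have hB : pvBlockCol head e enemy = true ↔
            ∃ x ∈ enemy, ((fun x => pvCh x 1 == pvCh head 1) x = true ∧
              ((0 < (fun x => (pvCh x 0 : Int) - pvCh head 0) x ∧
                 (fun x => (pvCh x 0 : Int) - pvCh head 0) x < (fun x => (pvCh x 0 : Int) - pvCh head 0) e) ∨
               ((fun x => (pvCh x 0 : Int) - pvCh head 0) e < (fun x => (pvCh x 0 : Int) - pvCh head 0) x ∧
                 (fun x => (pvCh x 0 : Int) - pvCh head 0) x < 0))) := by
          rw [blockCol_iff]
          refine exists_congr fun x => and_congr_right fun _ => ?_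
          simp only [beq_iff_eq]; omega
        have hfire := fire_iff (fun x => pvCh x 1 == pvCh head 1)
          (fun x => (pvCh x 0 : Int) - pvCh head 0) enemy e he (by simp [h1]) (by simp; omega)
          (pvBlockCol head e enemy) hB
        have hd1 : (0:Int) < (pvCh e 0 : Int) - (pvCh head 0 : Int) := by omega
        have hd2 : ¬((pvCh e 0 : Int) - (pvCh head 0 : Int) < 0) := by omega
        simp only [pvTake, beq_iff_eq,
          if_neg (show ¬(pvCh e 0 = pvCh head 0 ∧ pvCh e 1 = pvCh head 1) from fun h => h0 h.1),
          if_neg h0, if_pos h1, hd1, hd2, decide_true, decide_false, Bool.false_and,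
          Bool.or_false, Bool.false_or] at hfire ⊢
        simp [hfire, h0, h1]
      · have hlt : pvCh e 0 < pvCh head 0 := by omega
        have hB : pvBlockCol head e enemy = true ↔
            ∃ x ∈ enemy, ((fun x => pvCh x 1 == pvCh head 1) x = true ∧
              ((0 < (fun x => (pvCh head 0 : Int) - pvCh x 0) x ∧
                 (fun x => (pvCh head 0 : Int) - pvCh x 0) x < (fun x => (pvCh head 0 : Int) - pvCh x 0) e) ∨
               ((fun x => (pvCh head 0 : Int) - pvCh x 0) e < (fun x => (pvCh head 0 : Int) - pvCh x 0) x ∧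
                 (fun x => (pvCh head 0 : Int) - pvCh x 0) x < 0))) := by
          rw [blockCol_iff]
          refine exists_congr fun x => and_congr_right fun _ => ?_
          simp only [beq_iff_eq]; omega
        have hfire := fire_iff (fun x => pvCh x 1 == pvCh head 1)
          (fun x => (pvCh head 0 : Int) - pvCh x 0) enemy e he (by simp [h1]) (by simp; omega)
          (pvBlockCol head e enemy) hB
        have hd1 : ¬((0:Int) < (pvCh e 0 : Int) - (pvCh head 0 : Int)) := by omega
        have hd2 : ((pvCh e 0 : Int) - (pvCh head 0 : Int)) < 0 := by omega
        have hneg : -((pvCh e 0 : Int) - (pvCh head 0 : Int)) = (pvCh head 0 : Int) - (pvCh e 0 : Int) := by omega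
        simp only [pvTake, beq_iff_eq,
          if_neg (show ¬(pvCh e 0 = pvCh head 0 ∧ pvCh e 1 = pvCh head 1) from fun h => h0 h.1),
          if_neg h0, if_pos h1, hd1, hd2, decide_true, decide_false, Bool.false_and,
          Bool.false_or, hneg] at hfire ⊢
        simp [hfire, h0, h1]
    · simp [pvTake, h0, h1]

theorem solveF_eq : ∀ (fuel : Nat) (head : String) (enemy : List String),
    enemy.length = fuel → solveF fuel head enemy = solveAltF fuel head enemy := by
  intro fuel
  induction fuel with
  | zero => intro head enemy _; rfl
  | succ n ih =>
    intro head enemy hlen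
    rw [solveF, solveAltF]
    apply PySem.List.foldl_congr_mem
    intro r i hi
    have hin : i < enemy.length := List.mem_range.mp hi
    have he : enemy.getD i "" ∈ enemy := by
      rw [List.getD_eq_getElem _ _ hin]; exact List.getElem_mem hin
    have hrec : solveF n (enemy.getD i "") (enemy.take i ++ enemy.drop (i + 1))
        = solveAltF n (enemy.getD i "") (enemy.take i ++ enemy.drop (i + 1)) :=
      ih _ _ (by simp [List.length_take, List.length_drop]; omega)
    have htake := take_iff head enemy (enemy.getD i "") he
    simp only [htake, hrec]
    cases hrow : (pvCh (enemy.getD i "") 0 == pvCh head 0 && !pvBlockRow head (enemy.getD i "") enemy) <;>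
      cases hcol : (pvCh (enemy.getD i "") 1 == pvCh head 1 && !pvBlockCol head (enemy.getD i "") enemy) <;>
        simp <;> omega

theorem solve_eq_alt : ∀ (head : String) (enemy : List String), solve head enemy = solve_alt head enemy :=
  fun head enemy => solveF_eq enemy.length head enemy rfl

-- ===== VERDICT (by name: the statement is the Claim_ definition above) =====
theorem solve_spec : Claim_equal_solve := by
  intro head enemy _ _
  unfold Spec_solve
  exact solve_eq_alt head enemy
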